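-- pv_equiv track=rewrite | github.com/QianfengWen/ChessQA | code/dataset/05_1_comment_filtering.py | format_pgn_until
-- ===== SOURCE A (Python) =====
-- from typing import Dict, Iterable, List, Optional, Tuple
--
-- def format_pgn_until(san_moves: List[str]) -> str:
--     """Format SAN moves with move numbers up to and including the last move.
--
--     Example: ["e4", "e5", "Nf3"] -> "1. e4 e5 2. Nf3"
--     """
--     out: List[str] = []
--     move_index = 0
--     move_number = 1
--     while move_index < len(san_moves):
--         # White move
--         out.append(f"{move_number}. {san_moves[move_index]}")
--         move_index += 1
--         if move_index < len(san_moves):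
--             # Black move on same move number
--             out.append(san_moves[move_index])
--             move_index += 1
--         move_number += 1
--     return " ".join(out)
-- ===== SOURCE B (Python) =====
-- def format_pgn_until(san_moves):
--     """Format SAN moves with move numbers up to and including the last move."""
--     out = []
--     for n, i in enumerate(range(0, len(san_moves), 2), start=1):
--         chunk = san_moves[i:i + 2]
--         out.append(f"{n}. " + " ".join(chunk))
--     return " ".join(out)
-- ===== Notes on version B (the rewrite author's own statement) =====
-- stated objective: simpler
-- what changed: Replaces A's while loop stepping move_index with an inner if-branch for the black move by a single enumerate over range(0, len, 2) that slices each two-move chunk and joins it, so the trailing white-only move needs no branch.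
import Mathlib
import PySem

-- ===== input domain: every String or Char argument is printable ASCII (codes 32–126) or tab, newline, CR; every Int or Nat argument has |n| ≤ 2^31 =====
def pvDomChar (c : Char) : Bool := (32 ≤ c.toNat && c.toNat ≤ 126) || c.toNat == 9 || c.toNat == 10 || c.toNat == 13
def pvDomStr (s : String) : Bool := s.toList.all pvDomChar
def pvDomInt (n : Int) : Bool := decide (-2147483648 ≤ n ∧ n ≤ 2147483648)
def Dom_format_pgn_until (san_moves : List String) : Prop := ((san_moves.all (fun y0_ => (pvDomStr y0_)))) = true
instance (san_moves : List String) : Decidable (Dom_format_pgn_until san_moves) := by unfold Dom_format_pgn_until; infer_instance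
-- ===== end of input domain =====

-- B replaces A's index/while loop with two branches by a single loop over move numbers
-- taking each pair as a slice and joining it (objective: simpler decomposition, same cost).

-- ===== PORT A =====
-- while loop over move_index: consume the white move, and, if present, the black move.
def formatPgnLoop : List String → Int → List String → List String
  | [], _, out => out
  | [w], n, out => out ++ [PySem.Int.toStr n ++ ". " ++ w]
  | w :: b :: rest, n, out =>
      formatPgnLoop rest (n + 1) (out ++ [PySem.Int.toStr n ++ ". " ++ w] ++ [b])

def format_pgn_until (san_moves : List String) : String :=
  PySem.Str.join " " (formatPgnLoop san_moves 1 [])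

-- ===== PORT B =====
-- for n, i in enumerate(range(0, len(san_moves), 2), start=1): out.append(f"{n}. " + " ".join(san_moves[i:i+2]))
def format_pgn_until_alt (san_moves : List String) : String :=
  let out : List String :=
    (PySem.List.enumerate (PySem.List.pyRange 0 (san_moves.length : Int) 2) 1).foldl
      (fun out ni =>
        out ++ [PySem.Int.toStr ni.1 ++ ". " ++
          PySem.Str.join " " (PySem.List.slice san_moves (some ni.2) (some (ni.2 + 2)))]) []
  PySem.Str.join " " out

-- ===== PRECONDITION & SPEC =====
def Spec_format_pgn_until (san_moves : List String) (out : String) : Prop := out = format_pgn_until_alt san_moves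
instance (san_moves : List String) (out : String) : Decidable (Spec_format_pgn_until san_moves out) := by unfold Spec_format_pgn_until; infer_instance

-- ===== CLAIM (what is proved, stated in full; the proofs are below) =====
def Claim_equal_format_pgn_until : Prop := ∀ (san_moves : List String), Dom_format_pgn_until san_moves → Spec_format_pgn_until san_moves (format_pgn_until san_moves)

-- ===== LEMMAS AND PROOFS =====

-- the entries A's loop appends: "n. white", then black as a separate entry
def aChunks : List String → Int → List String
  | [], _ => []
  | [w], n => [PySem.Int.toStr n ++ ". " ++ w]
  | w :: b :: rest, n =>
      (PySem.Int.toStr n ++ ". " ++ w) :: b :: aChunks rest (n + 1)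

-- the entries B's loop appends: one joined chunk per move number
def bChunks : List String → Int → List String
  | [], _ => []
  | [w], n => [PySem.Int.toStr n ++ ". " ++ PySem.Str.join " " [w]]
  | w :: b :: rest, n =>
      (PySem.Int.toStr n ++ ". " ++ PySem.Str.join " " [w, b]) :: bChunks rest (n + 1)

theorem formatPgnLoop_eq : ∀ (san : List String) (n : Int) (out : List String),
    formatPgnLoop san n out = out ++ aChunks san n
  | [], _, out => by simp [formatPgnLoop, aChunks]
  | [w], n, out => by simp [formatPgnLoop, aChunks]
  | w :: b :: rest, n, out => by
      rw [formatPgnLoop, formatPgnLoop_eq rest (n + 1), aChunks]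
      simp

theorem pyRange_two_nil (a b : Int) (h : b ≤ a) : PySem.List.pyRange a b 2 = [] := by
  rw [PySem.List.pyRange_of_pos _ _ (by norm_num : (0:Int) < 2)]
  simp [show ¬ a < b by omega]

theorem pyRange_two_cons (a b : Int) (h : a < b) :
    PySem.List.pyRange a b 2 = a :: PySem.List.pyRange (a + 2) b 2 := by
  rw [PySem.List.pyRange_of_pos _ _ (by norm_num : (0:Int) < 2),
      PySem.List.pyRange_of_pos _ _ (by norm_num : (0:Int) < 2)]
  have key : ((b - a + 2 - 1) / 2).toNat
      = (if a + 2 < b then ((b - (a + 2) + 2 - 1) / 2).toNat else 0) + 1 := by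
    split_ifs <;> omega
  rw [if_pos h, key, List.range_succ_eq_map]
  simp only [List.map_cons, List.map_map]
  congr 1
  · simp
  · apply List.map_congr_left
    intro k _
    simp [Function.comp]
    ring

theorem bfold_eq : ∀ (san : List String), ∀ (pre full : List String) (n : Int) (acc : List String),
    full = pre ++ san →
    (PySem.List.enumerate
        (PySem.List.pyRange (pre.length : Int) ((pre.length : Int) + (san.length : Int)) 2) n).foldl
      (fun out ni =>
        out ++ [PySem.Int.toStr ni.1 ++ ". " ++
          PySem.Str.join " " (PySem.List.slice full (some ni.2) (some (ni.2 + 2)))]) acc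
    = acc ++ bChunks san n
  | [], pre, full, n, acc, hfull => by
      rw [show ((pre.length : Int) + (([] : List String).length : Int)) = (pre.length : Int) by
            simp,
          pyRange_two_nil _ _ le_rfl]
      simp [bChunks]
  | [w], pre, full, n, acc, hfull => by
      have hr : PySem.List.pyRange (pre.length : Int) ((pre.length : Int) + 1) 2
          = [(pre.length : Int)] := by
        rw [pyRange_two_cons _ _ (by omega), pyRange_two_nil _ _ (by omega)]
      have hs : PySem.List.slice full (some (pre.length : Int)) (some ((pre.length : Int) + 2))
          = [w] := by
        rw [PySem.List.slice_toNat full (by positivity) (by positivity), hfull,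
          show ((pre.length : Int)).toNat = pre.length by omega,
          show ((pre.length : Int) + 2).toNat = pre.length + 2 by omega,
          List.drop_left, show pre.length + 2 - pre.length = 2 by omega]
        simp
      simp [hr, PySem.List.enumerate, hs, bChunks]
  | w :: b :: rest, pre, full, n, acc, hfull => by
      have hr : PySem.List.pyRange (pre.length : Int)
            ((pre.length : Int) + ((w :: b :: rest).length : Int)) 2
          = (pre.length : Int) ::
            PySem.List.pyRange ((pre.length : Int) + 2)
              ((pre.length : Int) + ((w :: b :: rest).length : Int)) 2 := by
        rw [pyRange_two_cons _ _ (by simp; omega)]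
      have hs : PySem.List.slice full (some (pre.length : Int)) (some ((pre.length : Int) + 2))
          = [w, b] := by
        rw [PySem.List.slice_toNat full (by positivity) (by positivity), hfull,
          show ((pre.length : Int)).toNat = pre.length by omega,
          show ((pre.length : Int) + 2).toNat = pre.length + 2 by omega,
          List.drop_left, show pre.length + 2 - pre.length = 2 by omega]
        simp
      rw [hr, PySem.List.enumerate_cons, List.foldl_cons]
      have harr : ((pre.length : Int) + 2) = (((pre ++ [w, b]).length : Int)) := by
        simp
      have harr2 : ((pre.length : Int) + ((w :: b :: rest).length : Int))
          = (((pre ++ [w, b]).length : Int) + (rest.length : Int)) := by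
        simp; omega
      rw [hs, harr, harr2,
        bfold_eq rest (pre ++ [w, b]) full (n + 1) _ (by simp [hfull]),
        bChunks]
      simp

theorem joinChars_eq : ∀ (san : List String) (n : Int),
    PySem.Chars.join (" ".toList) ((aChunks san n).map String.toList)
    = PySem.Chars.join (" ".toList) ((bChunks san n).map String.toList)
  | [], n => by simp [aChunks, bChunks]
  | [w], n => by
      simp [aChunks, bChunks, PySem.Chars.join_singleton, PySem.Str.toList_join]
  | w :: b :: rest, n => by
      have ih := joinChars_eq rest (n + 1)
      match hrest : rest with
      | [] =>
          simp [aChunks, bChunks, PySem.Chars.join_cons_cons, PySem.Chars.join_singleton,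
            PySem.Str.toList_join]
      | r :: rs =>
          have ha : aChunks (r :: rs) (n + 1) ≠ [] := by
            cases rs <;> simp [aChunks]
          have hb : bChunks (r :: rs) (n + 1) ≠ [] := by
            cases rs <;> simp [bChunks]
          obtain ⟨z, zs, hz⟩ := List.exists_cons_of_ne_nil ha
          obtain ⟨u, us, hu⟩ := List.exists_cons_of_ne_nil hb
          rw [aChunks, bChunks, hz, hu]
          rw [hz, hu] at ih
          simp only [List.map_cons, PySem.Chars.join_cons_cons, PySem.Str.toList_join,
            List.map_nil, PySem.Chars.join_singleton, String.toList_append] at ih ⊢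
          rw [ih]
          simp [List.append_assoc]

-- ===== VERDICT (by name: the statement is the Claim_ definition above) =====
theorem format_pgn_until_spec : Claim_equal_format_pgn_until := by
  intro san _
  unfold Spec_format_pgn_until format_pgn_until format_pgn_until_alt
  rw [formatPgnLoop_eq]
  have hb := bfold_eq san [] san 1 [] (by simp)
  simp only [List.length_nil, Nat.cast_zero, zero_add, List.nil_append] at hb
  rw [hb]
  apply String.toList_injective ?_
  rw [PySem.Str.toList_join, PySem.Str.toList_join]
  exact joinChars_eq san 1
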